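-- pv_equiv track=rewrite | github.com/emoyertech/future-proof | python/notes0.py | choose_plain_text_url
-- ===== SOURCE A (Python) =====
-- from typing import Optional, List
--
-- def choose_plain_text_url(formats: dict) -> Optional[str]:
--     """Select the best plain-text URL from a Gutendex formats map."""
--     preferred_keys = [
--         "text/plain; charset=utf-8",
--         "text/plain; charset=us-ascii",
--         "text/plain",
--     ]
--     for key in preferred_keys:
--         candidate = formats.get(key)
--         if candidate:
--             return candidate
--     for key, value in formats.items():
--         if key.lower().startswith("text/plain") and value:
--             return value
--     return None
-- ===== SOURCE B (Python) =====
-- from typing import Optional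
--
-- _PREFERRED_RANK = {
--     "text/plain; charset=utf-8": 0,
--     "text/plain; charset=us-ascii": 1,
--     "text/plain": 2,
-- }
--
-- def choose_plain_text_url(formats: dict) -> Optional[str]:
--     """Select the best plain-text URL from a Gutendex formats map.
--
--     Single pass: track the minimum-rank preferred key with a truthy value,
--     and, separately, the first truthy value whose key starts with 'text/plain'
--     (case-insensitive) as a fallback.
--     """
--     best_rank = None
--     best_val = None
--     fallback = None
--     for key, value in formats.items():
--         if not value:
--             continue
--         r = _PREFERRED_RANK.get(key)
--         if r is not None and (best_rank is None or r < best_rank):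
--             best_rank = r
--             best_val = value
--         if fallback is None and key.lower().startswith("text/plain"):
--             fallback = value
--     return best_val if best_rank is not None else fallback
-- ===== Notes on version B (the rewrite author's own statement) =====
-- stated objective: alternative
-- what changed: Replaces A's two ordered scans (three preferred-key dict lookups, then a fallback scan over items) with a single pass over formats.items() that tracks the minimum-rank preferred match and the first truthy 'text/plain*' fallback.
import Mathlib
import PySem

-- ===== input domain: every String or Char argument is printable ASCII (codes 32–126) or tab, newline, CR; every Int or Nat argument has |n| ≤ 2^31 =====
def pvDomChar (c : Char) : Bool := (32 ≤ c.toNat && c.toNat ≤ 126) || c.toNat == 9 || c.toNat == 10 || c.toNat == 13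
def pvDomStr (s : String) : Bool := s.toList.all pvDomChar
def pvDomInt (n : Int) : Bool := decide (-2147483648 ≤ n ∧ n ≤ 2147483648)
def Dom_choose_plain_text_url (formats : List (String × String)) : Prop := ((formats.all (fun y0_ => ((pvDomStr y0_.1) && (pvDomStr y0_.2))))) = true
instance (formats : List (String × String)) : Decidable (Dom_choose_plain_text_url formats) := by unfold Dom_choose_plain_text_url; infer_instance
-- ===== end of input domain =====

-- B replaces A's two ordered scans (three dict lookups, then a fallback scan) by a single
-- pass over the items that tracks the minimum-rank preferred match and the first fallback
-- (objective: alternative decomposition, same cost).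

-- ===== PORT A =====
def pvPreferredKeys : List String :=
  ["text/plain; charset=utf-8", "text/plain; charset=us-ascii", "text/plain"]

-- the first 'for key in preferred_keys' loop: return formats.get(key) when truthy
def pvFirstPreferred (d : PySem.Dict String String) : List String → Option String
  | [] => none
  | k :: ks =>
    match d.get? k with
    | some v => if v != "" then some v else pvFirstPreferred d ks
    | none => pvFirstPreferred d ks

-- the second loop over formats.items()
def pvFallbackScan : List (String × String) → Option String
  | [] => none
  | (k, v) :: rest =>
    if PySem.Str.startswith (PySem.Str.lower k) "text/plain" && (v != "") then some v
    else pvFallbackScan rest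

def choose_plain_text_url (formats : List (String × String)) : Option String :=
  let d := PySem.Dict.ofList formats
  match pvFirstPreferred d pvPreferredKeys with
  | some v => some v
  | none => pvFallbackScan d.items

-- ===== PORT B =====
def pvRank : PySem.Dict String Int :=
  PySem.Dict.ofList
    [("text/plain; charset=utf-8", 0), ("text/plain; charset=us-ascii", 1), ("text/plain", 2)]

-- one loop iteration of Source B: state = (best_rank, best_val, fallback)
def pvStep (st : Option Int × Option String × Option String) (p : String × String) :
    Option Int × Option String × Option String :=
  if p.2 == "" then st
  else
    let st1 :=
      match pvRank.get? p.1 with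
      | some r =>
        match st.1 with
        | some br => if r < br then (some r, some p.2, st.2.2) else st
        | none => (some r, some p.2, st.2.2)
      | none => st
    match st1.2.2 with
    | some _ => st1
    | none =>
      if PySem.Str.startswith (PySem.Str.lower p.1) "text/plain" then (st1.1, st1.2.1, some p.2)
      else st1

def choose_plain_text_url_alt (formats : List (String × String)) : Option String :=
  let d := PySem.Dict.ofList formats
  let st := d.items.foldl pvStep (none, none, none)
  match st.1 with
  | some _ => st.2.1
  | none => st.2.2

-- ===== PRECONDITION & SPEC =====
def Spec_choose_plain_text_url (formats : List (String × String)) (out : Option String) : Prop := out = choose_plain_text_url_alt formats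
instance (formats : List (String × String)) (out : Option String) : Decidable (Spec_choose_plain_text_url formats out) := by unfold Spec_choose_plain_text_url; infer_instance

-- ===== CLAIM (what is proved, stated in full; the proofs are below) =====
def Claim_equal_choose_plain_text_url : Prop := ∀ (formats : List (String × String)), Dom_choose_plain_text_url formats → Spec_choose_plain_text_url formats (choose_plain_text_url formats)



-- ===== LEMMAS AND PROOFS =====

set_option maxRecDepth 8192

def pvResolve (st : Option Int × Option String × Option String) : Option String :=
  match st.1 with
  | some _ => st.2.1
  | none => st.2.2

def pvTry (d : PySem.Dict String String) (k : String) (els : Option String) : Option String :=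
  match d.get? k with
  | some u => if u != "" then some u else els
  | none => els

lemma pvRank_get (k : String) : pvRank.get? k =
    if k = "text/plain; charset=utf-8" then some 0
    else if k = "text/plain; charset=us-ascii" then some 1
    else if k = "text/plain" then some 2 else none := by
  have h : pvRank = PySem.Dict.mk [("text/plain; charset=utf-8", 0), ("text/plain; charset=us-ascii", 1), ("text/plain", 2)] := by rfl
  rw [h]
  rw [PySem.Dict.get?_mk_cons, PySem.Dict.get?_mk_cons, PySem.Dict.get?_mk_cons]
  have hemp : (PySem.Dict.mk ([] : List (String × Int))).get? k = none := rfl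
  rw [hemp]
  simp only [beq_iff_eq]
  split_ifs <;> first | rfl | simp_all [eq_comm]

lemma pvGet_none_of_not_mem (rest : List (String × String)) (k : String)
    (h : k ∉ rest.map Prod.fst) : (PySem.Dict.mk rest).get? k = none := by
  rw [PySem.Dict.get?_eq_none_iff_not_mem_keys]
  simpa [PySem.Dict.keys_mk] using h

lemma pvTry_cons_eq (k v : String) (rest : List (String × String)) (q : String)
    (els : Option String) (h : k = q) :
    pvTry (PySem.Dict.mk ((k, v) :: rest)) q els = if v != "" then some v else els := by
  simp only [pvTry, PySem.Dict.get?_mk_cons, beq_iff_eq, if_pos h]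

lemma pvTry_cons_ne (k v : String) (rest : List (String × String)) (q : String)
    (els : Option String) (h : ¬ k = q) :
    pvTry (PySem.Dict.mk ((k, v) :: rest)) q els = pvTry (PySem.Dict.mk rest) q els := by
  simp only [pvTry, PySem.Dict.get?_mk_cons, beq_iff_eq, if_neg h]

lemma pvTry_none (d : PySem.Dict String String) (q : String) (els : Option String)
    (h : d.get? q = none) : pvTry d q els = els := by
  simp only [pvTry, h]

lemma pvFirstPreferred_eq (d : PySem.Dict String String) (fb : Option String) :
    (match pvFirstPreferred d pvPreferredKeys with
     | some v => some v
     | none => fb) =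
    pvTry d "text/plain; charset=utf-8" (pvTry d "text/plain; charset=us-ascii" (pvTry d "text/plain" fb)) := by
  simp only [pvFirstPreferred, pvPreferredKeys, pvTry]
  rcases h0 : d.get? "text/plain; charset=utf-8" with _ | u0 <;>
  rcases h1 : d.get? "text/plain; charset=us-ascii" with _ | u1 <;>
  rcases h2 : d.get? "text/plain" with _ | u2 <;>
  simp <;> split_ifs <;> simp_all

-- once best_rank = 0 and the fallback is set, the loop state never changes
lemma pvFoldl_rank0 (l : List (String × String)) (w : Option String) (f : String) :
    l.foldl pvStep (some 0, w, some f) = (some 0, w, some f) := by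
  induction l with
  | nil => rfl
  | cons p rest ih =>
    have hst : pvStep (some 0, w, some f) p = (some 0, w, some f) := by
      simp only [pvStep, pvRank_get]
      by_cases hv : (p.2 == "") = true
      · simp only [hv, if_true]
      · simp only [hv, Bool.false_eq_true, if_false]
        split_ifs <;> simp
    rw [List.foldl_cons, hst, ih]

-- with best_rank = 1 only a truthy exact utf-8 entry can still change the answer
lemma pvFoldl_rank1 (l : List (String × String)) (hnd : (l.map Prod.fst).Nodup)
    (w f : String) :
    pvResolve (l.foldl pvStep (some 1, some w, some f)) =
    pvTry (PySem.Dict.mk l) "text/plain; charset=utf-8" (some w) := by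
  induction l with
  | nil => rfl
  | cons p rest ih =>
    obtain ⟨k, v⟩ := p
    rw [List.map_cons, List.nodup_cons] at hnd
    obtain ⟨hmem, hnd'⟩ := hnd
    simp only at hmem
    rw [List.foldl_cons]
    by_cases hv : v = ""
    · have hst : pvStep (some 1, some w, some f) (k, v) = (some 1, some w, some f) := by
        simp [pvStep, hv]
      rw [hst, ih hnd']
      by_cases h0 : k = "text/plain; charset=utf-8"
      · have hr : (PySem.Dict.mk rest).get? "text/plain; charset=utf-8" = none := by
          rw [← h0]; exact pvGet_none_of_not_mem rest k hmem
        rw [pvTry_cons_eq k v rest _ _ h0, pvTry_none _ _ _ hr]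
        simp [hv]
      · rw [pvTry_cons_ne k v rest _ _ h0]
    · by_cases h0 : k = "text/plain; charset=utf-8"
      · have hst : pvStep (some 1, some w, some f) (k, v) = (some 0, some v, some f) := by
          simp [pvStep, pvRank_get, h0, hv]
        rw [hst, pvFoldl_rank0, pvTry_cons_eq k v rest _ _ h0]
        simp [pvResolve, hv]
      · have hst : pvStep (some 1, some w, some f) (k, v) = (some 1, some w, some f) := by
          simp only [pvStep, pvRank_get]
          simp only [beq_iff_eq, hv, if_false, if_neg h0]
          split_ifs <;> simp
        rw [hst, ih hnd', pvTry_cons_ne k v rest _ _ h0]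

-- with best_rank = 2 the exact utf-8 then us-ascii entries can still change the answer
lemma pvFoldl_rank2 (l : List (String × String)) (hnd : (l.map Prod.fst).Nodup)
    (w f : String) :
    pvResolve (l.foldl pvStep (some 2, some w, some f)) =
    pvTry (PySem.Dict.mk l) "text/plain; charset=utf-8"
      (pvTry (PySem.Dict.mk l) "text/plain; charset=us-ascii" (some w)) := by
  induction l with
  | nil => rfl
  | cons p rest ih =>
    obtain ⟨k, v⟩ := p
    rw [List.map_cons, List.nodup_cons] at hnd
    obtain ⟨hmem, hnd'⟩ := hnd
    simp only at hmem
    rw [List.foldl_cons]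
    by_cases hv : v = ""
    · have hst : pvStep (some 2, some w, some f) (k, v) = (some 2, some w, some f) := by
        simp [pvStep, hv]
      rw [hst, ih hnd']
      by_cases h0 : k = "text/plain; charset=utf-8"
      · have hr : (PySem.Dict.mk rest).get? "text/plain; charset=utf-8" = none := by
          rw [← h0]; exact pvGet_none_of_not_mem rest k hmem
        have hx1 : ¬ k = "text/plain; charset=us-ascii" := by rw [h0]; decide
        rw [pvTry_cons_eq k v rest _ _ h0, pvTry_cons_ne k v rest _ _ hx1, pvTry_none _ _ _ hr]
        simp [hv]
      · by_cases h1 : k = "text/plain; charset=us-ascii"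
        · have hr : (PySem.Dict.mk rest).get? "text/plain; charset=us-ascii" = none := by
            rw [← h1]; exact pvGet_none_of_not_mem rest k hmem
          have hx0 : ¬ k = "text/plain; charset=utf-8" := by rw [h1]; decide
          rw [pvTry_cons_ne k v rest _ _ hx0, pvTry_cons_eq k v rest _ _ h1, pvTry_none _ _ _ hr]
          simp [hv]
        · rw [pvTry_cons_ne k v rest _ _ h0, pvTry_cons_ne k v rest _ _ h1]
    · by_cases h0 : k = "text/plain; charset=utf-8"
      · have hst : pvStep (some 2, some w, some f) (k, v) = (some 0, some v, some f) := by
          simp [pvStep, pvRank_get, h0, hv]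
        rw [hst, pvFoldl_rank0, pvTry_cons_eq k v rest _ _ h0]
        simp [pvResolve, hv]
      · by_cases h1 : k = "text/plain; charset=us-ascii"
        · have hst : pvStep (some 2, some w, some f) (k, v) = (some 1, some v, some f) := by
            simp [pvStep, pvRank_get, h1, hv]
          rw [hst, pvFoldl_rank1 rest hnd' v f, pvTry_cons_ne k v rest _ _ h0,
            pvTry_cons_eq k v rest _ _ h1]
          simp [hv]
        · have hst : pvStep (some 2, some w, some f) (k, v) = (some 2, some w, some f) := by
            simp only [pvStep, pvRank_get]
            simp only [beq_iff_eq, hv, if_false, if_neg h0, if_neg h1]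
            split_ifs <;> simp
          rw [hst, ih hnd', pvTry_cons_ne k v rest _ _ h0, pvTry_cons_ne k v rest _ _ h1]

-- no best match yet, fallback already set
lemma pvFoldl_fb (l : List (String × String)) (hnd : (l.map Prod.fst).Nodup) (f : String) :
    pvResolve (l.foldl pvStep (none, none, some f)) =
    pvTry (PySem.Dict.mk l) "text/plain; charset=utf-8"
      (pvTry (PySem.Dict.mk l) "text/plain; charset=us-ascii"
        (pvTry (PySem.Dict.mk l) "text/plain" (some f))) := by
  induction l with
  | nil => rfl
  | cons p rest ih =>
    obtain ⟨k, v⟩ := p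
    rw [List.map_cons, List.nodup_cons] at hnd
    obtain ⟨hmem, hnd'⟩ := hnd
    simp only at hmem
    rw [List.foldl_cons]
    by_cases hv : v = ""
    · have hst : pvStep (none, none, some f) (k, v) = (none, none, some f) := by
        simp [pvStep, hv]
      rw [hst, ih hnd']
      by_cases h0 : k = "text/plain; charset=utf-8"
      · have hr : (PySem.Dict.mk rest).get? "text/plain; charset=utf-8" = none := by
          rw [← h0]; exact pvGet_none_of_not_mem rest k hmem
        have hx1 : ¬ k = "text/plain; charset=us-ascii" := by rw [h0]; decide
        have hx2 : ¬ k = "text/plain" := by rw [h0]; decide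
        rw [pvTry_cons_eq k v rest _ _ h0, pvTry_cons_ne k v rest _ _ hx1, pvTry_cons_ne k v rest _ _ hx2, pvTry_none _ _ _ hr]
        simp [hv]
      · by_cases h1 : k = "text/plain; charset=us-ascii"
        · have hr : (PySem.Dict.mk rest).get? "text/plain; charset=us-ascii" = none := by
            rw [← h1]; exact pvGet_none_of_not_mem rest k hmem
          have hx0 : ¬ k = "text/plain; charset=utf-8" := by rw [h1]; decide
          have hx2 : ¬ k = "text/plain" := by rw [h1]; decide
          rw [pvTry_cons_ne k v rest _ _ hx0, pvTry_cons_eq k v rest _ _ h1, pvTry_cons_ne k v rest _ _ hx2, pvTry_none _ _ _ hr]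
          simp [hv]
        · by_cases h2 : k = "text/plain"
          · have hr : (PySem.Dict.mk rest).get? "text/plain" = none := by
              rw [← h2]; exact pvGet_none_of_not_mem rest k hmem
            have hx0 : ¬ k = "text/plain; charset=utf-8" := by rw [h2]; decide
            have hx1 : ¬ k = "text/plain; charset=us-ascii" := by rw [h2]; decide
            rw [pvTry_cons_ne k v rest _ _ hx0, pvTry_cons_ne k v rest _ _ hx1, pvTry_cons_eq k v rest _ _ h2, pvTry_none _ _ _ hr]
            simp [hv]
          · rw [pvTry_cons_ne k v rest _ _ h0, pvTry_cons_ne k v rest _ _ h1,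
              pvTry_cons_ne k v rest _ _ h2]
    · by_cases h0 : k = "text/plain; charset=utf-8"
      · have hst : pvStep (none, none, some f) (k, v) = (some 0, some v, some f) := by
          simp [pvStep, pvRank_get, h0, hv]
        rw [hst, pvFoldl_rank0, pvTry_cons_eq k v rest _ _ h0]
        simp [pvResolve, hv]
      · by_cases h1 : k = "text/plain; charset=us-ascii"
        · have hst : pvStep (none, none, some f) (k, v) = (some 1, some v, some f) := by
            simp [pvStep, pvRank_get, h1, hv]
          rw [hst, pvFoldl_rank1 rest hnd' v f, pvTry_cons_ne k v rest _ _ h0,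
            pvTry_cons_eq k v rest _ _ h1]
          simp [hv]
        · by_cases h2 : k = "text/plain"
          · have hst : pvStep (none, none, some f) (k, v) = (some 2, some v, some f) := by
              simp [pvStep, pvRank_get, h2, hv]
            rw [hst, pvFoldl_rank2 rest hnd' v f, pvTry_cons_ne k v rest _ _ h0,
              pvTry_cons_ne k v rest _ _ h1, pvTry_cons_eq k v rest _ _ h2]
            simp [hv]
          · have hst : pvStep (none, none, some f) (k, v) = (none, none, some f) := by
              simp only [pvStep, pvRank_get]
              simp only [beq_iff_eq, hv, if_false, if_neg h0, if_neg h1, if_neg h2]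
            rw [hst, ih hnd', pvTry_cons_ne k v rest _ _ h0, pvTry_cons_ne k v rest _ _ h1,
              pvTry_cons_ne k v rest _ _ h2]

-- the main loop invariant, from the empty state
lemma pvFoldl_main (l : List (String × String)) (hnd : (l.map Prod.fst).Nodup) :
    pvResolve (l.foldl pvStep (none, none, none)) =
    pvTry (PySem.Dict.mk l) "text/plain; charset=utf-8"
      (pvTry (PySem.Dict.mk l) "text/plain; charset=us-ascii"
        (pvTry (PySem.Dict.mk l) "text/plain" (pvFallbackScan l))) := by
  induction l with
  | nil => rfl
  | cons p rest ih =>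
    obtain ⟨k, v⟩ := p
    rw [List.map_cons, List.nodup_cons] at hnd
    obtain ⟨hmem, hnd'⟩ := hnd
    simp only at hmem
    rw [List.foldl_cons]
    by_cases hv : v = ""
    · have hst : pvStep (none, none, none) (k, v) = (none, none, none) := by
        simp [pvStep, hv]
      have hfb : pvFallbackScan ((k, v) :: rest) = pvFallbackScan rest := by
        simp [pvFallbackScan, hv]
      rw [hst, ih hnd', hfb]
      by_cases h0 : k = "text/plain; charset=utf-8"
      · have hr : (PySem.Dict.mk rest).get? "text/plain; charset=utf-8" = none := by
          rw [← h0]; exact pvGet_none_of_not_mem rest k hmem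
        have hx1 : ¬ k = "text/plain; charset=us-ascii" := by rw [h0]; decide
        have hx2 : ¬ k = "text/plain" := by rw [h0]; decide
        rw [pvTry_cons_eq k v rest _ _ h0, pvTry_cons_ne k v rest _ _ hx1, pvTry_cons_ne k v rest _ _ hx2, pvTry_none _ _ _ hr]
        simp [hv]
      · by_cases h1 : k = "text/plain; charset=us-ascii"
        · have hr : (PySem.Dict.mk rest).get? "text/plain; charset=us-ascii" = none := by
            rw [← h1]; exact pvGet_none_of_not_mem rest k hmem
          have hx0 : ¬ k = "text/plain; charset=utf-8" := by rw [h1]; decide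
          have hx2 : ¬ k = "text/plain" := by rw [h1]; decide
          rw [pvTry_cons_ne k v rest _ _ hx0, pvTry_cons_eq k v rest _ _ h1, pvTry_cons_ne k v rest _ _ hx2, pvTry_none _ _ _ hr]
          simp [hv]
        · by_cases h2 : k = "text/plain"
          · have hr : (PySem.Dict.mk rest).get? "text/plain" = none := by
              rw [← h2]; exact pvGet_none_of_not_mem rest k hmem
            have hx0 : ¬ k = "text/plain; charset=utf-8" := by rw [h2]; decide
            have hx1 : ¬ k = "text/plain; charset=us-ascii" := by rw [h2]; decide
            rw [pvTry_cons_ne k v rest _ _ hx0, pvTry_cons_ne k v rest _ _ hx1, pvTry_cons_eq k v rest _ _ h2, pvTry_none _ _ _ hr]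
            simp [hv]
          · rw [pvTry_cons_ne k v rest _ _ h0, pvTry_cons_ne k v rest _ _ h1,
              pvTry_cons_ne k v rest _ _ h2]
    · by_cases h0 : k = "text/plain; charset=utf-8"
      · have hst : pvStep (none, none, none) (k, v) = (some 0, some v, some v) := by
          simp [pvStep, pvRank_get, h0, hv]
          decide
        rw [hst, pvFoldl_rank0, pvTry_cons_eq k v rest _ _ h0]
        simp [pvResolve, hv]
      · by_cases h1 : k = "text/plain; charset=us-ascii"
        · have hst : pvStep (none, none, none) (k, v) = (some 1, some v, some v) := by
            simp [pvStep, pvRank_get, h1, hv]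
            decide
          rw [hst, pvFoldl_rank1 rest hnd' v v, pvTry_cons_ne k v rest _ _ h0,
            pvTry_cons_eq k v rest _ _ h1]
          simp [hv]
        · by_cases h2 : k = "text/plain"
          · have hst : pvStep (none, none, none) (k, v) = (some 2, some v, some v) := by
              simp [pvStep, pvRank_get, h2, hv]
              decide
            rw [hst, pvFoldl_rank2 rest hnd' v v, pvTry_cons_ne k v rest _ _ h0,
              pvTry_cons_ne k v rest _ _ h1, pvTry_cons_eq k v rest _ _ h2]
            simp [hv]
          · by_cases hsw : PySem.Str.startswith (PySem.Str.lower k) "text/plain" = true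
            · have hst : pvStep (none, none, none) (k, v) = (none, none, some v) := by
                simp only [pvStep, pvRank_get]
                simp only [beq_iff_eq, hv, if_false, if_neg h0, if_neg h1, if_neg h2, hsw]
                simp
              have hfb : pvFallbackScan ((k, v) :: rest) = some v := by
                have hswc : PySem.Chars.startswith (PySem.Chars.lower k.toList) ['t','e','x','t','/','p','l','a','i','n'] = true := by
                  simpa using hsw
                simp [pvFallbackScan, hswc, hv]
              rw [hst, pvFoldl_fb rest hnd' v, hfb, pvTry_cons_ne k v rest _ _ h0,
                pvTry_cons_ne k v rest _ _ h1, pvTry_cons_ne k v rest _ _ h2]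
            · have hswc : PySem.Chars.startswith (PySem.Chars.lower k.toList) ['t','e','x','t','/','p','l','a','i','n'] = false := by
                simpa using hsw
              have hst : pvStep (none, none, none) (k, v) = (none, none, none) := by
                simp only [pvStep, pvRank_get]
                simp only [beq_iff_eq, hv, if_false, if_neg h0, if_neg h1, if_neg h2]
                simp [hswc]
              have hfb : pvFallbackScan ((k, v) :: rest) = pvFallbackScan rest := by
                simp [pvFallbackScan, hswc]
              rw [hst, ih hnd', hfb, pvTry_cons_ne k v rest _ _ h0,
                pvTry_cons_ne k v rest _ _ h1, pvTry_cons_ne k v rest _ _ h2]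

-- ===== VERDICT (by name: the statement is the Claim_ definition above) =====
theorem choose_plain_text_url_spec : Claim_equal_choose_plain_text_url := by
  intro formats _
  unfold Spec_choose_plain_text_url
  show choose_plain_text_url formats = choose_plain_text_url_alt formats
  unfold choose_plain_text_url choose_plain_text_url_alt
  set d := PySem.Dict.ofList formats with hd
  have hmk : PySem.Dict.mk d.items = d := rfl
  have hnd : (d.items.map Prod.fst).Nodup := by
    have := PySem.Dict.nodup_keys_ofList (κ := String) (ν := String) formats
    simpa [PySem.Dict.keys, hd] using this
  have halt : (match (d.items.foldl pvStep (none, none, none)).1 with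
      | some _ => (d.items.foldl pvStep (none, none, none)).2.1
      | none => (d.items.foldl pvStep (none, none, none)).2.2) =
      pvResolve (d.items.foldl pvStep (none, none, none)) := rfl
  rw [pvFirstPreferred_eq d (pvFallbackScan d.items), halt,
    pvFoldl_main d.items hnd, hmk]
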